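-- pv_equiv track=rewrite | github.com/arin17bishwa/myCP_sols | CF/1467B.py | func
-- ===== SOURCE A (Python) =====
-- def f(arr, i):
--     if i <= 0 or i >= len(arr) - 1:
--         return 0
--     return (arr[i] > arr[i - 1] and arr[i] > arr[i + 1]) or (arr[i] < arr[i - 1] and arr[i] < arr[i + 1])
--
-- def func(arr, n):
--     if n < 3:
--         return 0
--     l1 = [f(arr, i) for i in range(1, n - 1)]
--     ans = sum(l1)
--     answer = ans
--     for i in range(n):
--         p = arr[i]
--         old = sum([f(arr, j) for j in range(i - 1, i + 2)])
--         for j in [i - 1, i + 1]: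
--             if 0 <= j < n:
--                 for k in range(-1, 2):
--                     arr[i] = k + arr[j]
--                     new = sum([f(arr, ind) for ind in range(i - 1, i + 2)])
--                     ans = min(ans, answer - old + new)
--         arr[i] = p
--     return ans
-- ===== SOURCE B (Python) =====
-- def is_extremum(a, j):
--     if j <= 0 or j >= len(a) - 1:
--         return 0
--     return 1 if (a[j - 1] < a[j] > a[j + 1]) or (a[j - 1] > a[j] < a[j + 1]) else 0
--
--
-- def func(arr, n):
--     if n < 3:
--         return 0
--
--     def affected():
--         # extrema count over positions 1..n, the whole span a single-element
--         # change can influence (positions >= len(arr)-1 contribute 0)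
--         return sum(is_extremum(arr, j) for j in range(1, n + 1))
--
--     base = sum(is_extremum(arr, j) for j in range(1, n - 1))
--     t0 = affected()
--     ans = base
--     for i in range(n):
--         p = arr[i]
--         for j in (i - 1, i + 1):
--             if 0 <= j < n:
--                 for k in (-1, 0, 1):
--                     arr[i] = arr[j] + k
--                     ans = min(ans, base + affected() - t0)
--         arr[i] = p
--     return ans
-- ===== Notes on version B (the rewrite author's own statement) =====
-- stated objective: simpler
-- what changed: B drops A's per-position old/new incremental window bookkeeping and instead rescans the whole affected span (positions 1..n) from scratch for every candidate value, scoring each candidate as base + scan_after - scan_before.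
import Mathlib
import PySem

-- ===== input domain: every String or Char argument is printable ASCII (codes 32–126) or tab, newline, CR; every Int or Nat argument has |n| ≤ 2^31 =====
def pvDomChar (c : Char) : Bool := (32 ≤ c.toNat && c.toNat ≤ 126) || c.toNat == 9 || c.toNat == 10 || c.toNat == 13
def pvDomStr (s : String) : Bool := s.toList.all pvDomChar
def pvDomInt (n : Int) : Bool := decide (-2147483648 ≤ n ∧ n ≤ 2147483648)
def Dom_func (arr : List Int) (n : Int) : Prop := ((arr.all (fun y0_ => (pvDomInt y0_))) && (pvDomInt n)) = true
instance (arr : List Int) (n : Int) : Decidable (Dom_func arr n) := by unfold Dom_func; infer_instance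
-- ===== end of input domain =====

-- B replaces A's incremental answer-old+new window bookkeeping by a from-scratch rescan of the
-- whole affected span (positions 1..n) per candidate, with delta accounting base+after-before
-- (simpler loop body, not faster). Both Pythons mutate arr transiently but fully restore it;
-- the equivalence is about the return value.

-- ===== PORT A =====
-- helper f of A (0/1 as int; the guard makes all index accesses in-range, so pyGetD is exact)
def fA (arr : List Int) (i : Int) : Int :=
  if i ≤ 0 ∨ i ≥ (arr.length : Int) - 1 then 0
  else
    let m := PySem.List.pyGetD arr i 0
    let l := PySem.List.pyGetD arr (i - 1) 0
    let r := PySem.List.pyGetD arr (i + 1) 0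
    if (m > l ∧ m > r) ∨ (m < l ∧ m < r) then 1 else 0

def func (arr : List Int) (n : Int) : Int :=
  if n < 3 then 0
  else
    let ans0 := ((PySem.List.pyRange 1 (n - 1) 1).map (fun i => fA arr i)).sum
    let answer := ans0
    (PySem.List.pyRange 0 n 1).foldl (fun ans i =>
      let old := ((PySem.List.pyRange (i - 1) (i + 2) 1).map (fun j => fA arr j)).sum
      [i - 1, i + 1].foldl (fun ans j =>
        if 0 ≤ j ∧ j < n then
          (PySem.List.pyRange (-1) 2 1).foldl (fun ans k =>
            let arr2 := PySem.List.pySetD arr i (k + PySem.List.pyGetD arr j 0)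
            let new := ((PySem.List.pyRange (i - 1) (i + 2) 1).map (fun ind => fA arr2 ind)).sum
            min ans (answer - old + new)) ans
        else ans) ans) ans0

-- ===== PORT B =====
-- helper is_extremum of Source B (chained comparisons spelled out; guard keeps accesses in-range)
def peakOrValley (a : List Int) (j : Int) : Int :=
  if j ≤ 0 ∨ j ≥ (a.length : Int) - 1 then 0
  else
    if (PySem.List.pyGetD a (j - 1) 0 < PySem.List.pyGetD a j 0 ∧
          PySem.List.pyGetD a j 0 > PySem.List.pyGetD a (j + 1) 0) ∨
       (PySem.List.pyGetD a (j - 1) 0 > PySem.List.pyGetD a j 0 ∧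
          PySem.List.pyGetD a j 0 < PySem.List.pyGetD a (j + 1) 0) then 1 else 0

-- Source B's affected() closure: extrema count over positions 1..n of the current array
def affectedB (a : List Int) (n : Int) : Int :=
  ((PySem.List.pyRange 1 (n + 1) 1).map (fun j => peakOrValley a j)).sum

def func_alt (arr : List Int) (n : Int) : Int :=
  if n < 3 then 0
  else
    let base := ((PySem.List.pyRange 1 (n - 1) 1).map (fun j => peakOrValley arr j)).sum
    let t0 := affectedB arr n
    (PySem.List.pyRange 0 n 1).foldl (fun ans i =>
      [i - 1, i + 1].foldl (fun ans j =>
        if 0 ≤ j ∧ j < n then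
          [-1, 0, 1].foldl (fun ans k =>
            min ans (base + affectedB (PySem.List.pySetD arr i (PySem.List.pyGetD arr j 0 + k)) n - t0)) ans
        else ans) ans) base

-- ===== PRECONDITION & SPEC =====
-- Pre_ excludes exactly the inputs on which A raises IndexError: 3 ≤ n together with n > len(arr)
-- (the loops then index arr beyond its end).
def Pre_func (arr : List Int) (n : Int) : Prop := n < 3 ∨ n ≤ (arr.length : Int)
instance (arr : List Int) (n : Int) : Decidable (Pre_func arr n) := by unfold Pre_func; infer_instance
def pvWitness_func : List Int × Int := ([1, 3, 2], 3)

def Spec_func (arr : List Int) (n : Int) (out : Int) : Prop := out = func_alt arr n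
instance (arr : List Int) (n : Int) (out : Int) : Decidable (Spec_func arr n out) := by unfold Spec_func; infer_instance

-- ===== CLAIM (what is proved, stated in full; the proofs are below) =====
def Claim_equal_func : Prop := ∀ (arr : List Int) (n : Int), Dom_func arr n → Pre_func arr n → Spec_func arr n (func arr n)

-- ===== LEMMAS AND PROOFS =====

-- A's inner predicate and B's are the same 0/1 function
theorem fA_eq_pv (a : List Int) (j : Int) : fA a j = peakOrValley a j := by
  simp only [fA, peakOrValley, gt_iff_lt]

theorem pyGetD_set_ne (xs : List Int) (i t v : Int) (h0 : 0 ≤ i) (hl : i < (xs.length : Int))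
    (ht0 : 0 ≤ t) (hne : t ≠ i) :
    PySem.List.pyGetD (PySem.List.pySetD xs i v) t 0 = PySem.List.pyGetD xs t 0 := by
  have hi : i = ((i.toNat : Nat) : Int) := by omega
  have htn : t = ((t.toNat : Nat) : Int) := by omega
  rw [hi, htn] at hne ⊢
  rw [PySem.List.pyGetD_pySetD_natCast xs i.toNat t.toNat v 0 (by omega)]
  rw [if_neg (by omega)]

theorem length_set' (xs : List Int) (i v : Int) :
    ((PySem.List.pySetD xs i v).length : Int) = (xs.length : Int) := by
  simp [PySem.List.length_pySetD]

theorem fA_guard_zero (a : List Int) (j : Int) (h : j ≤ 0 ∨ (a.length : Int) - 1 ≤ j) :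
    fA a j = 0 := by
  unfold fA
  rw [if_pos (by omega)]

-- fA is unchanged at positions not adjacent to the modified index
theorem fA_set_far (xs : List Int) (i v j : Int) (h0 : 0 ≤ i) (hl : i < (xs.length : Int))
    (hfar : j < i - 1 ∨ i + 1 < j) :
    fA (PySem.List.pySetD xs i v) j = fA xs j := by
  by_cases hgd : j ≤ 0 ∨ j ≥ (xs.length : Int) - 1
  · rw [fA_guard_zero (PySem.List.pySetD xs i v) j
        (by rw [length_set']; exact hgd),
      fA_guard_zero xs j hgd]
  · have hb : 0 < j ∧ j < (xs.length : Int) - 1 := by omega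
    have e1 := pyGetD_set_ne xs i j v h0 hl (by omega) (by omega)
    have e2 := pyGetD_set_ne xs i (j - 1) v h0 hl (by omega) (by omega)
    have e3 := pyGetD_set_ne xs i (j + 1) v h0 hl (by omega) (by omega)
    simp only [fA, length_set', e1, e2, e3]

theorem sum_map_zero {l : List Int} {g : Int → Int} (h : ∀ x ∈ l, g x = 0) :
    (l.map g).sum = 0 := by
  apply List.sum_eq_zero
  intro y hy
  obtain ⟨x, hx, rfl⟩ := List.mem_map.mp hy
  exact h x hx

-- key exchange lemma: the change in the window sum equals the change in the affected-span sum
theorem key_exchange (arr : List Int) (n i v : Int) (hn : n ≤ (arr.length : Int))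
    (h3 : 3 ≤ n) (hi0 : 0 ≤ i) (hin : i < n) :
    ((PySem.List.pyRange 1 (n + 1) 1).map (fun j => fA (PySem.List.pySetD arr i v) j)).sum
      - ((PySem.List.pyRange 1 (n + 1) 1).map (fun j => fA arr j)).sum
    = ((PySem.List.pyRange (i - 1) (i + 2) 1).map
          (fun j => fA (PySem.List.pySetD arr i v) j)).sum
      - ((PySem.List.pyRange (i - 1) (i + 2) 1).map (fun j => fA arr j)).sum := by
  set m := PySem.List.pySetD arr i v with hm
  set lo : Int := max 1 (i - 1) with hlo
  have hsplit1 : PySem.List.pyRange 1 (n + 1) 1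
      = PySem.List.pyRange 1 lo 1 ++ PySem.List.pyRange lo (i + 2) 1 ++ PySem.List.pyRange (i + 2) (n + 1) 1 := by
    rw [PySem.List.pyRange_one_append 1 lo (n + 1) (by omega) (by omega),
        PySem.List.pyRange_one_append lo (i + 2) (n + 1) (by omega) (by omega)]
    simp [List.append_assoc]
  have hsplit2 : PySem.List.pyRange (i - 1) (i + 2) 1
      = PySem.List.pyRange (i - 1) lo 1 ++ PySem.List.pyRange lo (i + 2) 1 := by
    rw [PySem.List.pyRange_one_append (i - 1) lo (i + 2) (by omega) (by omega)]
  -- the outer pieces of the affected span are unchanged by the modification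
  have hmap1 : (List.map (fun j => fA m j) (PySem.List.pyRange 1 lo 1)).sum
      = (List.map (fun j => fA arr j) (PySem.List.pyRange 1 lo 1)).sum := by
    apply congrArg List.sum; apply List.map_congr_left
    intro j hj; rw [PySem.List.mem_pyRange_one] at hj
    exact fA_set_far arr i v j hi0 (by omega) (by omega)
  have hmap2 : (List.map (fun j => fA m j) (PySem.List.pyRange (i + 2) (n + 1) 1)).sum
      = (List.map (fun j => fA arr j) (PySem.List.pyRange (i + 2) (n + 1) 1)).sum := by
    apply congrArg List.sum; apply List.map_congr_left
    intro j hj; rw [PySem.List.mem_pyRange_one] at hj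
    exact fA_set_far arr i v j hi0 (by omega) (by omega)
  -- the left piece of the window is out of range, hence zero for both arrays
  have hz1a : (List.map (fun j => fA arr j) (PySem.List.pyRange (i - 1) lo 1)).sum = 0 := by
    apply sum_map_zero; intro j hj; rw [PySem.List.mem_pyRange_one] at hj
    exact fA_guard_zero arr j (by omega)
  have hz1m : (List.map (fun j => fA m j) (PySem.List.pyRange (i - 1) lo 1)).sum = 0 := by
    apply sum_map_zero; intro j hj; rw [PySem.List.mem_pyRange_one] at hj
    exact fA_guard_zero m j (by omega)
  rw [hsplit1, hsplit2]
  simp only [List.map_append, List.sum_append]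
  rw [hz1a, hz1m, hmap1, hmap2]
  ring

-- sums of fA equal sums of B's predicate over any range
theorem sum_fA_pv (a : List Int) (lo hi : Int) :
    ((PySem.List.pyRange lo hi 1).map (fun j => fA a j)).sum
      = ((PySem.List.pyRange lo hi 1).map (fun j => peakOrValley a j)).sum :=
  congrArg List.sum (List.map_congr_left (fun j _ => fA_eq_pv a j))

-- A's candidate value equals B's candidate value
theorem cand_eq (arr : List Int) (n i w k : Int) (hn : n ≤ (arr.length : Int))
    (h3 : 3 ≤ n) (hi0 : 0 ≤ i) (hin : i < n) :
    ((PySem.List.pyRange 1 (n - 1) 1).map (fun j => fA arr j)).sum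
      - ((PySem.List.pyRange (i - 1) (i + 2) 1).map (fun j => fA arr j)).sum
      + ((PySem.List.pyRange (i - 1) (i + 2) 1).map
          (fun j => fA (PySem.List.pySetD arr i (k + w)) j)).sum
    = ((PySem.List.pyRange 1 (n - 1) 1).map (fun j => peakOrValley arr j)).sum
      + affectedB (PySem.List.pySetD arr i (w + k)) n - affectedB arr n := by
  rw [show w + k = k + w by ring]
  unfold affectedB
  rw [← sum_fA_pv arr 1 (n - 1), ← sum_fA_pv arr 1 (n + 1),
      ← sum_fA_pv (PySem.List.pySetD arr i (k + w)) 1 (n + 1)]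
  have hk := key_exchange arr n i (k + w) hn h3 hi0 hin
  omega

theorem foldl_ext' {α β : Type} (f g : α → β → α) (a : α) (l : List β)
    (h : ∀ acc, ∀ x ∈ l, f acc x = g acc x) : l.foldl f a = l.foldl g a := by
  induction l generalizing a with
  | nil => rfl
  | cons x t ih =>
    simp only [List.foldl_cons]
    rw [h a x (by simp)]
    exact ih _ (fun acc y hy => h acc y (by simp [hy]))

theorem pyRange_cand : PySem.List.pyRange (-1) 2 1 = [-1, 0, 1] := by decide

-- ===== VERDICT (by name: the statement is the Claim_ definition above) =====
theorem func_spec : Claim_equal_func := by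
  intro arr n _ hpre
  unfold Spec_func func func_alt
  by_cases hsm : n < 3
  · simp [hsm]
  · rw [if_neg hsm, if_neg hsm]
    have hn : n ≤ (arr.length : Int) := by
      rcases hpre with h | h
      · omega
      · exact h
    have h3 : 3 ≤ n := by omega
    rw [sum_fA_pv arr 1 (n - 1)]
    apply foldl_ext'
    intro acc i hi
    rw [PySem.List.mem_pyRange_one] at hi
    apply foldl_ext'
    intro acc2 j hj
    by_cases hjn : 0 ≤ j ∧ j < n
    · rw [if_pos hjn, if_pos hjn, pyRange_cand]
      apply foldl_ext'
      intro acc3 k _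
      dsimp only
      rw [← cand_eq arr n i (PySem.List.pyGetD arr j 0) k hn h3 hi.1 hi.2]
      rw [sum_fA_pv arr 1 (n - 1)]
    · rw [if_neg hjn, if_neg hjn]
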